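-- pv_equiv track=rewrite | github.com/Icln/Algorithm | 프로그래머스/lv2/131704. 택배상자/택배상자.py | solution
-- ===== SOURCE A (Python) =====
-- def solution(order):
--     stack = []
--     idx = 0
--
--     for num in range(1, len(order) + 1):
--         stack.append(num)
--         while stack and stack[-1] == order[idx]:
--             stack.pop()
--             idx += 1
--
--     return idx
-- ===== SOURCE B (Python) =====
-- def solution(order):
--     # Interval-encoded stack: the pending (pushed, not yet popped) numbers are kept
--     # as a stack of maximal runs (lo, hi); M = highest number pushed so far.
--     # A target p is loadable iff it is a brand-new number (M < p <= len(order)),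
--     # which pushes the run M+1..p-1 in O(1), or it equals the top run's high end.
--     n = len(order)
--     intervals = []
--     M = 0
--     cnt = 0
--     for p in order:
--         if M < p <= n:
--             if M + 1 <= p - 1:
--                 intervals.append((M + 1, p - 1))
--             M = p
--             cnt += 1
--         elif intervals and intervals[-1][1] == p:
--             lo, hi = intervals.pop()
--             if lo <= hi - 1:
--                 intervals.append((lo, hi - 1))
--             cnt += 1
--         else:
--             break
--     return cnt
-- ===== Notes on version B (the rewrite author's own statement) =====
-- stated objective: faster
-- what changed: Replaced A's per-number stack simulation (push each of 1..n, pop greedily) with a run-length/interval-encoded stack driven by the order list: a target is loadable iff it is a new maximum at most n (pushing the whole run M+1..p-1 as one (lo,hi) pair in O(1)) or equals the top run's high end; a failed target breaks immediately instead of finishing the 1..n loop.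
import Mathlib
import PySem

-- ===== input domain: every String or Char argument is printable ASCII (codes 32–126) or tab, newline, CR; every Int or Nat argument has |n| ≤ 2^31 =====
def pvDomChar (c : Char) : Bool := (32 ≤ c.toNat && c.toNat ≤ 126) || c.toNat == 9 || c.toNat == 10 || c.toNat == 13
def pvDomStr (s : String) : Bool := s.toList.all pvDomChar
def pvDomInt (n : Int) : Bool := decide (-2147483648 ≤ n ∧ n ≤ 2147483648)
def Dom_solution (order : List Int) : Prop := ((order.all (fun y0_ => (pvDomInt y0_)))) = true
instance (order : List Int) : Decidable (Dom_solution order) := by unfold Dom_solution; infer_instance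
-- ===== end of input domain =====

-- B replaces A's per-number stack simulation by a run-length (interval) encoded stack
-- driven by the order list: a target succeeds iff it is a new maximum ≤ n (push the run
-- M+1..p-1 as one pair) or equals the top run's high end; objective: faster by a constant factor (interval pushes are O(1), and it stops at the first failed target).

-- ===== PORT A =====
-- stacks are stored top-first (head = Python stack[-1]).
-- inner `while stack and stack[-1] == order[idx]`: Python's order[idx] is always in
-- range when the stack is nonempty (pops = idx < pushes ≤ n), so pyGet? = some is exact.
def popA (order : List Int) : List Int → Int → List Int × Int
  | [], idx => ([], idx)
  | t :: s, idx =>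
    if PySem.List.pyGet? order idx = some t then popA order s (idx + 1) else (t :: s, idx)

-- `for num in range(1, len(order)+1)` as a fold over the range, state = (stack, idx)
def solution (order : List Int) : Int :=
  ((PySem.List.pyRange 1 ((order.length : Int) + 1) 1).foldl
      (fun st num => popA order (num :: st.1) st.2) ([], 0)).2

-- ===== PORT B =====
-- the interval stack is stored top-first (head = Python intervals[-1]);
-- `for p in order: … else: break` with state (intervals, M, cnt)
def loopB (n : Int) : List Int → List (Int × Int) → Int → Int → Int
  | [], _, _, cnt => cnt
  | p :: rest, ivs, M, cnt =>
    if M < p ∧ p ≤ n then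
      loopB n rest (if M + 1 ≤ p - 1 then (M + 1, p - 1) :: ivs else ivs) p (cnt + 1)
    else
      match ivs with
      | (lo, hi) :: tl =>
        if hi = p then
          loopB n rest (if lo ≤ hi - 1 then (lo, hi - 1) :: tl else tl) M (cnt + 1)
        else cnt
      | [] => cnt

def solution_alt (order : List Int) : Int :=
  loopB (order.length : Int) order [] 0 0

-- ===== PRECONDITION & SPEC =====
def Spec_solution (order : List Int) (out : Int) : Prop := out = solution_alt order
instance (order : List Int) (out : Int) : Decidable (Spec_solution order out) := by unfold Spec_solution; infer_instance

-- ===== CLAIM (what is proved, stated in full; the proofs are below) =====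
def Claim_equal_solution : Prop := ∀ (order : List Int), Dom_solution order → Spec_solution order (solution order)

-- ===== LEMMAS AND PROOFS =====

-- common greedy reference machine: pop if the top matches order[idx], else push nxt if
-- nxt ≤ n, else stop and return idx
def g (order : List Int) (n nxt : Int) (stack : List Int) (idx : Int) : Int :=
  match stack with
  | t :: s =>
    if PySem.List.pyGet? order idx = some t then g order n nxt s (idx + 1)
    else if _h : nxt ≤ n then g order n (nxt + 1) (nxt :: (t :: s)) idx else idx
  | [] => if _h : nxt ≤ n then g order n (nxt + 1) [nxt] idx else idx
termination_by (2 * (n + 1 - nxt)).toNat + stack.length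
decreasing_by all_goals (simp only [List.length_cons]; omega)

theorem g_popA (order : List Int) (n nxt : Int) :
    ∀ (stack : List Int) (idx : Int),
      g order n nxt stack idx = g order n nxt (popA order stack idx).1 (popA order stack idx).2 := by
  intro stack
  induction stack with
  | nil => intro idx; simp [popA]
  | cons t s ih =>
    intro idx
    by_cases h : PySem.List.pyGet? order idx = some t
    · rw [g, if_pos h, popA, if_pos h]; exact ih (idx + 1)
    · simp [popA, h]

theorem popA_stuck (order : List Int) :
    ∀ (stack : List Int) (idx : Int) (t : Int) (s : List Int),
      (popA order stack idx).1 = t :: s → ¬ PySem.List.pyGet? order (popA order stack idx).2 = some t := by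
  intro stack
  induction stack with
  | nil => intro idx t s h; simp [popA] at h
  | cons u s' ih =>
    intro idx t s h
    by_cases hm : PySem.List.pyGet? order idx = some u
    · rw [popA, if_pos hm] at h ⊢; exact ih (idx + 1) t s h
    · rw [popA, if_neg hm] at h ⊢
      obtain ⟨rfl, -⟩ : u = t ∧ s' = s := by simpa using h
      exact hm

theorem g_none (order : List Int) (n : Int) :
    ∀ (nxt : Int) (stack : List Int) (idx : Int),
      PySem.List.pyGet? order idx = none → g order n nxt stack idx = idx := by
  intro nxt stack idx
  induction nxt, stack, idx using g.induct order n with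
  | case1 nxt t s idx hm ih => intro h; rw [h] at hm; exact absurd hm (by simp)
  | case2 nxt t s idx hm hle ih =>
    intro h; rw [g, if_neg hm, dif_pos hle]; exact ih h
  | case3 nxt t s idx hm hle =>
    intro h; rw [g, if_neg hm, dif_neg hle]
  | case4 nxt idx hle ih => intro h; rw [g, dif_pos hle]; exact ih h
  | case5 nxt idx hle => intro h; rw [g, dif_neg hle]

-- a target that is neither the current top nor reachable by pushes stalls g forever
theorem g_break (order : List Int) (n : Int) :
    ∀ (nxt : Int) (stack : List Int) (idx : Int), ∀ t : Int,
      PySem.List.pyGet? order idx = some t → stack.head? ≠ some t → (n < t ∨ t < nxt) →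
      g order n nxt stack idx = idx := by
  intro nxt stack idx
  induction nxt, stack, idx using g.induct order n with
  | case1 nxt idx u s hm ih =>
    intro t hget hhead _
    have hut : u = t := by rw [hget] at hm; exact (Option.some.inj hm).symm
    exact absurd (by simp [hut]) hhead
  | case2 nxt idx u s hm hle ih =>
    intro t hget hhead hlt
    rw [g, if_neg hm, dif_pos hle]
    exact ih t hget (by simp; omega) (by omega)
  | case3 nxt idx u s hm hle => intro t hget hhead hlt; rw [g, if_neg hm, dif_neg hle]
  | case4 nxt idx hle ih =>
    intro t hget hhead hlt
    rw [g, dif_pos hle]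
    exact ih t hget (by simp; omega) (by omega)
  | case5 nxt idx hle => intro t hget hhead hlt; rw [g, dif_neg hle]

-- seg lo hi = [hi, hi-1, …, lo] (the run as the plain stack stores it, top-first)
def segAux : Nat → Int → Int → List Int
  | 0, _, _ => []
  | f + 1, lo, hi => if lo ≤ hi then hi :: segAux f lo (hi - 1) else []

def seg (lo hi : Int) : List Int := segAux (hi + 1 - lo).toNat lo hi

theorem segAux_fuel : ∀ (f : Nat) (lo hi : Int), (hi + 1 - lo).toNat ≤ f →
    segAux f lo hi = seg lo hi := by
  intro f
  induction f with
  | zero =>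
    intro lo hi hf
    have : ¬ lo ≤ hi := by omega
    rw [segAux, seg]
    have : (hi + 1 - lo).toNat = 0 := by omega
    rw [this, segAux]
  | succ f ih =>
    intro lo hi hf
    by_cases h : lo ≤ hi
    · have h2 : (hi + 1 - lo).toNat = ((hi - 1) + 1 - lo).toNat + 1 := by omega
      rw [segAux, if_pos h, ih lo (hi - 1) (by omega)]
      conv_rhs => rw [seg, h2, segAux]
      rw [if_pos h]
      rfl
    · rw [segAux, if_neg h, seg]
      have : (hi + 1 - lo).toNat = 0 := by omega
      rw [this, segAux]

theorem seg_nil (lo hi : Int) (h : hi < lo) : seg lo hi = [] := by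
  rw [seg]
  have : (hi + 1 - lo).toNat = 0 := by omega
  rw [this, segAux]

theorem seg_cons (lo hi : Int) (h : lo ≤ hi) : seg lo hi = hi :: seg lo (hi - 1) := by
  rw [seg]
  have : (hi + 1 - lo).toNat = ((hi - 1) + 1 - lo).toNat + 1 := by omega
  rw [this, segAux, if_pos h, segAux_fuel _ _ _ (le_refl _)]

theorem seg_mem : ∀ (f : Nat) (lo hi : Int), (hi + 1 - lo).toNat ≤ f →
    ∀ x ∈ seg lo hi, lo ≤ x ∧ x ≤ hi := by
  intro f
  induction f with
  | zero =>
    intro lo hi hf x hx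
    rw [seg_nil lo hi (by omega)] at hx
    simp at hx
  | succ f ih =>
    intro lo hi hf x hx
    by_cases h : lo ≤ hi
    · rw [seg_cons lo hi h] at hx
      rcases List.mem_cons.mp hx with rfl | hx
      · omega
      · have := ih lo (hi - 1) (by omega) x hx
        omega
    · rw [seg_nil lo hi (by omega)] at hx; simp at hx

theorem seg_snoc (lo hi : Int) (h : lo ≤ hi) : seg lo hi = seg (lo + 1) hi ++ [lo] := by
  have key : ∀ (f : Nat) (hi : Int), (hi - lo).toNat ≤ f → lo ≤ hi →
      seg lo hi = seg (lo + 1) hi ++ [lo] := by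
    intro f
    induction f with
    | zero =>
      intro hi hf hle
      have : hi = lo := by omega
      rw [this]
      rw [seg_cons lo lo (le_refl _), seg_nil lo (lo - 1) (by omega),
        seg_nil (lo + 1) lo (by omega)]
      rfl
    | succ f ih =>
      intro hi hf hle
      by_cases h2 : lo ≤ hi - 1
      · rw [seg_cons lo hi hle, ih (hi - 1) (by omega) h2,
          seg_cons (lo + 1) hi (by omega)]
        rfl
      · have : hi = lo := by omega
        rw [this]
        rw [seg_cons lo lo (le_refl _), seg_nil lo (lo - 1) (by omega),
          seg_nil (lo + 1) lo (by omega)]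
        rfl
  exact key (hi - lo).toNat hi (le_refl _) h

-- decode the interval stack into the plain stack it represents
def decode (ivs : List (Int × Int)) : List Int := ivs.flatMap (fun iv => seg iv.1 iv.2)

-- well-formedness: runs are nonempty, bounded by M, and strictly descend down the stack
def StInv : Int → List (Int × Int) → Prop
  | _, [] => True
  | M, (lo, hi) :: tl => 1 ≤ lo ∧ lo ≤ hi ∧ hi ≤ M ∧ StInv (lo - 1) tl

theorem stInv_mono : ∀ (ivs : List (Int × Int)) (M M' : Int), M ≤ M' → StInv M ivs → StInv M' ivs := by
  intro ivs M M' h hi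
  cases ivs with
  | nil => trivial
  | cons iv tl =>
    obtain ⟨lo, hi2⟩ := iv
    obtain ⟨h1, h2, h3, h4⟩ := hi
    exact ⟨h1, h2, by omega, h4⟩

theorem decode_le : ∀ (ivs : List (Int × Int)) (M : Int), StInv M ivs →
    ∀ x ∈ decode ivs, x ≤ M := by
  intro ivs
  induction ivs with
  | nil => intro M _ x hx; simp [decode] at hx
  | cons iv tl ih =>
    intro M hStInv x hx
    obtain ⟨lo, hi⟩ := iv
    obtain ⟨h1, h2, h3, h4⟩ := hStInv
    rw [decode, List.flatMap_cons] at hx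
    rcases List.mem_append.mp hx with hx | hx
    · have := seg_mem (hi + 1 - lo).toNat lo hi (le_refl _) x hx
      omega
    · have := ih (lo - 1) h4 x hx
      omega

-- pushing M+1..p then immediately popping p, as g performs it step by step
theorem g_fill (order : List Int) (n p idx : Int)
    (hget : PySem.List.pyGet? order idx = some p) (hpn : p ≤ n) :
    ∀ (k : Nat) (q : Int) (s : List Int), (p - q).toNat = k → q ≤ p → (∀ x ∈ s, x < q) →
      g order n q s idx = g order n (p + 1) (seg q (p - 1) ++ s) (idx + 1) := by
  intro k
  induction k with
  | zero =>
    intro q s hk hq hs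
    have hqp : q = p := by omega
    subst hqp
    rw [seg_nil q (q - 1) (by omega), List.nil_append]
    cases s with
    | nil =>
      conv_lhs => rw [g]
      rw [dif_pos hpn]
      conv_lhs => rw [g]
      rw [if_pos hget]
    | cons t s' =>
      have ht : t < q := hs t (by simp)
      have hne : ¬ PySem.List.pyGet? order idx = some t := by
        rw [hget]; intro hc; have := Option.some.inj hc; omega
      conv_lhs => rw [g]
      rw [if_neg hne, dif_pos hpn]
      conv_lhs => rw [g]
      rw [if_pos hget]
  | succ k ih =>
    intro q s hk hq hs
    have hqn : q ≤ n := by omega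
    have step : g order n q s idx = g order n (q + 1) (q :: s) idx := by
      cases s with
      | nil =>
        conv_lhs => rw [g]
        rw [dif_pos hqn]
      | cons t s' =>
        have ht : t < q := hs t (by simp)
        have hne : ¬ PySem.List.pyGet? order idx = some t := by
          rw [hget]; intro hc; have := Option.some.inj hc; omega
        conv_lhs => rw [g]
        rw [if_neg hne, dif_pos hqn]
    rw [step, ih (q + 1) (q :: s) (by omega) (by omega)
      (by intro x hx; rcases List.mem_cons.mp hx with rfl | hx
          · omega
          · exact lt_trans (hs x hx) (by omega))]
    rw [seg_snoc q (p - 1) (by omega)]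
    simp

theorem loopB_eq_g (order : List Int) :
    ∀ (rest : List Int) (k : Nat) (ivs : List (Int × Int)) (M : Int),
      order.drop k = rest → 0 ≤ M → StInv M ivs →
      loopB (order.length : Int) rest ivs M (k : Int) =
        g order (order.length : Int) (M + 1) (decode ivs) (k : Int) := by
  intro rest
  induction rest with
  | nil =>
    intro k ivs M hdrop hM hStInv
    have hnone : PySem.List.pyGet? order (k : Int) = none := by
      rw [PySem.List.pyGet?_natCast, ← List.head?_drop, hdrop]; rfl
    rw [loopB, g_none order _ _ _ _ hnone]
  | cons p rest' ih =>
    intro k ivs M hdrop hM hStInv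
    have hget : PySem.List.pyGet? order (k : Int) = some p := by
      rw [PySem.List.pyGet?_natCast, ← List.head?_drop, hdrop]; rfl
    have hdrop' : order.drop (k + 1) = rest' := by
      rw [← List.tail_drop, hdrop]; rfl
    have hk1 : ((k : Int) + 1) = ((k + 1 : Nat) : Int) := by push_cast; ring
    by_cases hA : M < p ∧ p ≤ (order.length : Int)
    · rw [loopB.eq_def]
      simp only []
      rw [if_pos hA]
      have hle : ∀ x ∈ decode ivs, x < M + 1 := by
        intro x hx; have := decode_le ivs M hStInv x hx; omega
      rw [g_fill order _ p (k : Int) hget hA.2 (p - (M + 1)).toNat (M + 1) (decode ivs)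
        rfl (by omega) hle]
      have hdec : decode (if M + 1 ≤ p - 1 then (M + 1, p - 1) :: ivs else ivs) =
          seg (M + 1) (p - 1) ++ decode ivs := by
        by_cases h2 : M + 1 ≤ p - 1
        · rw [if_pos h2, decode, List.flatMap_cons]; rfl
        · rw [if_neg h2, seg_nil (M + 1) (p - 1) (by omega), List.nil_append]
      have hStInv' : StInv p (if M + 1 ≤ p - 1 then (M + 1, p - 1) :: ivs else ivs) := by
        by_cases h2 : M + 1 ≤ p - 1
        · rw [if_pos h2]
          exact ⟨by omega, h2, by omega, by simpa using hStInv⟩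
        · rw [if_neg h2]
          exact stInv_mono ivs M p (by omega) hStInv
      rw [hk1, ih (k + 1) _ p hdrop' (by omega) hStInv', hdec]
    · cases hivs : ivs with
      | nil =>
        rw [loopB.eq_def]
        simp only []
        rw [if_neg hA]
        rw [g_break order _ (M + 1) (decode []) (k : Int) p hget
          (by simp [decode]) (by omega)]
      | cons iv tl =>
        obtain ⟨lo, hi⟩ := iv
        rw [hivs] at hStInv
        obtain ⟨h1, h2, h3, h4⟩ := hStInv
        by_cases hhi : hi = p
        · subst hhi
          rw [loopB, if_neg hA, if_pos rfl]
          have hdec : decode ((lo, hi) :: tl) = hi :: (seg lo (hi - 1) ++ decode tl) := by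
            rw [decode, List.flatMap_cons, seg_cons lo hi h2]; rfl
          rw [hdec, g, if_pos hget]
          have hdec' : decode (if lo ≤ hi - 1 then (lo, hi - 1) :: tl else tl) =
              seg lo (hi - 1) ++ decode tl := by
            by_cases h5 : lo ≤ hi - 1
            · rw [if_pos h5, decode, List.flatMap_cons]; rfl
            · rw [if_neg h5, seg_nil lo (hi - 1) (by omega), List.nil_append]
          have hStInv' : StInv M (if lo ≤ hi - 1 then (lo, hi - 1) :: tl else tl) := by
            by_cases h5 : lo ≤ hi - 1
            · rw [if_pos h5]; exact ⟨h1, h5, by omega, h4⟩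
            · rw [if_neg h5]; exact stInv_mono tl (lo - 1) M (by omega) h4
          rw [hk1, ih (k + 1) _ M hdrop' hM hStInv', hdec']
        · rw [loopB, if_neg hA, if_neg hhi]
          have hhead : (decode ((lo, hi) :: tl)).head? ≠ some p := by
            rw [decode, List.flatMap_cons, seg_cons lo hi h2]
            simp only [List.cons_append, List.head?_cons]
            intro hc; exact hhi (Option.some.inj hc)
          rw [g_break order _ (M + 1) _ (k : Int) p hget hhead (by omega)]

-- A's fold equals the reference machine g
theorem foldlA_eq_g (order : List Int) :
    ∀ (k : Nat) (a : Int) (stack : List Int) (idx : Int),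
      ((order.length : Int) + 1 - a).toNat = k →
      (∀ t s, stack = t :: s → ¬ PySem.List.pyGet? order idx = some t) →
      ((PySem.List.pyRange a ((order.length : Int) + 1) 1).foldl
          (fun st num => popA order (num :: st.1) st.2) (stack, idx)).2 =
        g order (order.length : Int) a stack idx := by
  intro k
  induction k using Nat.strong_induction_on with
  | _ k ih =>
    intro a stack idx hk hstuck
    by_cases h : a ≤ (order.length : Int)
    · rw [PySem.List.pyRange_one_cons (by omega)]
      rw [List.foldl_cons]
      have hrec := ih (((order.length : Int) + 1 - (a + 1)).toNat) (by omega) (a + 1)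
        (popA order (a :: stack) idx).1 (popA order (a :: stack) idx).2 rfl
        (popA_stuck order (a :: stack) idx)
      calc ((PySem.List.pyRange (a + 1) ((order.length : Int) + 1) 1).foldl
              (fun st num => popA order (num :: st.1) st.2)
              (popA order (a :: stack) idx)).2
          = g order (order.length : Int) (a + 1) (popA order (a :: stack) idx).1
              (popA order (a :: stack) idx).2 := hrec
        _ = g order (order.length : Int) (a + 1) (a :: stack) idx := (g_popA order _ _ _ _).symm
        _ = g order (order.length : Int) a stack idx := by
              cases stack with
              | nil =>
                conv_rhs => rw [g]
                rw [dif_pos h]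
              | cons t s =>
                conv_rhs => rw [g]
                rw [if_neg (hstuck t s rfl), dif_pos h]
    · rw [PySem.List.pyRange_one_eq_nil (by omega), List.foldl_nil]
      cases stack with
      | nil =>
        rw [g, dif_neg h]
      | cons t s =>
        rw [g, if_neg (hstuck t s rfl), dif_neg h]

-- ===== VERDICT (by name: the statement is the Claim_ definition above) =====
theorem solution_spec : Claim_equal_solution := by
  intro order _
  unfold Spec_solution solution solution_alt
  rw [foldlA_eq_g order (((order.length : Int) + 1 - 1).toNat) 1 [] 0 rfl
    (by intro t s h; simp at h)]
  have := loopB_eq_g order order 0 [] 0 (by simp) (by omega) trivial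
  simpa [decode] using this.symm
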